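-- pv_equiv track=rewrite | github.com/xiaoyueli/MOOC | DatastructureAndAlgorithm/DataStructure-ZhejiangU(20160229-20160603)/week8_KeyActivities.py | compute_earliest_time
-- ===== SOURCE A (Python) =====
-- def compute_earliest_time(pre_points, ear_times, point):
--     pres = pre_points[point]
--
--     earliest = -1
--     for pre_info in pres:
--         pre_p = pre_info[0]
--         last_time = pre_info[1]
--         if ear_times[pre_p] < 0:
--             ear_times[pre_p] = compute_earliest_time(pre_points, ear_times, pre_p)
--         if earliest < ear_times[pre_p] + last_time:
--             earliest = ear_times[pre_p] + last_time
--
--     return earliest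
-- ===== SOURCE B (Python) =====
-- def compute_earliest_time(pre_points, ear_times, point):
--     # Iterative fixed-point: resolve earliest times by rounds over the node set,
--     # instead of A's memoized recursion (and without mutating ear_times).
--     val = {}
--     for _ in range(len(pre_points)):
--         for p in pre_points:
--             if p in val:
--                 continue
--             best = -1
--             ok = True
--             for q, w in pre_points[p]:
--                 t = ear_times.get(q)
--                 if t is None or t < 0:
--                     if q in val:
--                         t = val[q]
--                     else:
--                         ok = False
--                         break
--                 if best < t + w:
--                     best = t + w
--             if ok:
--                 val[p] = best
--     return val[point]
-- ===== Notes on version B (the rewrite author's own statement) =====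
-- stated objective: alternative
-- what changed: A's memoized top-down recursion (which mutates ear_times in place as its cache) is replaced by an iterative bottom-up fixed-point: B sweeps the node set for len(pre_points) rounds, resolving each node once all its negatively-cached predecessors are resolved, in a separate table and with no recursion and no mutation of ear_times.
import Mathlib
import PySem

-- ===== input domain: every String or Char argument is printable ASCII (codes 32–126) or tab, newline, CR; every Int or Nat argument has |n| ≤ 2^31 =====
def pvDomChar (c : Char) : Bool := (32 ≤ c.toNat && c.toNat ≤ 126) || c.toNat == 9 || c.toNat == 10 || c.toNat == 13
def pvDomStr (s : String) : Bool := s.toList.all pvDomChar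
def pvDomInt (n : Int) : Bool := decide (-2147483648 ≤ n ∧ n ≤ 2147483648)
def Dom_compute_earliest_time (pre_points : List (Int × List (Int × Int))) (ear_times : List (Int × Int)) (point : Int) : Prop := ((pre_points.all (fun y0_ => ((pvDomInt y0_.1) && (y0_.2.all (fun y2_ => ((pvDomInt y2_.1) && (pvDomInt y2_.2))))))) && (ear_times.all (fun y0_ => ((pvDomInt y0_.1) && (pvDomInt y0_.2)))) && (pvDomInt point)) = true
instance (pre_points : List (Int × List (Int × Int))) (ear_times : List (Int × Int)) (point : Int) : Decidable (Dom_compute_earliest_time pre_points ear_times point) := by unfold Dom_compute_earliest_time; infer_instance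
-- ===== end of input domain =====

-- B replaces A's memoized recursion (which caches by mutating ear_times in place) by an
-- iterative bottom-up fixed-point sweep kept in a separate table; the equivalence proved
-- here is about the RETURN value only (A mutates its ear_times argument, B does not).

-- ===== PORT A =====
-- A's recursion threading the mutable ear_times dict; fuel bounds the recursion depth,
-- which under Pre_ is at most pre_points.length (none = A raises / would not return).
mutual
def pvGoA (pre_points : List (Int × List (Int × Int))) (f : Nat) (ear : PySem.Dict Int Int) (p : Int) : Option (Int × PySem.Dict Int Int) :=
  match f with
  | 0 => none
  | Nat.succ f' =>
    match (PySem.Dict.mk pre_points).get? p with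
    | none => none          -- pre_points[point] : KeyError
    | some pres => pvLoopA pre_points f' pres ear (-1)
termination_by (f, 0)

def pvLoopA (pre_points : List (Int × List (Int × Int))) (f : Nat) (pres : List (Int × Int)) (ear : PySem.Dict Int Int) (earliest : Int) : Option (Int × PySem.Dict Int Int) :=
  match pres with
  | [] => some (earliest, ear)
  | (q, w) :: rest =>
    match ear.get? q with
    | none => none          -- ear_times[pre_p] : KeyError
    | some v =>
      if v < 0 then
        match pvGoA pre_points f ear q with
        | none => none
        | some (r, ear1) =>
          let ear2 := ear1.insert q r        -- ear_times[pre_p] = compute_earliest_time(...)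
          match ear2.get? q with             -- re-read ear_times[pre_p]
          | none => none
          | some t => pvLoopA pre_points f rest ear2 (if earliest < t + w then t + w else earliest)
      else
        pvLoopA pre_points f rest ear (if earliest < v + w then v + w else earliest)
termination_by (f, 1 + pres.length)
end

def compute_earliest_time (pre_points : List (Int × List (Int × Int))) (ear_times : List (Int × Int)) (point : Int) : Int :=
  match pvGoA pre_points (pre_points.length + 1) (PySem.Dict.mk ear_times) point with
  | some (v, _) => v
  | none => 0

-- ===== PORT B =====
-- inner predecessor loop: some best, or none when a needed entry is still unresolved (ok = False)
def pvResolve (ear_times : List (Int × Int)) (val : PySem.Dict Int Int) (pres : List (Int × Int)) (best : Int) : Option Int :=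
  match pres with
  | [] => some best
  | (q, w) :: rest =>
    match (match (PySem.Dict.mk ear_times).get? q with       -- t = ear_times.get(q)
           | none => val.get? q                              -- t is None: use val if resolved
           | some t => if t < 0 then val.get? q else some t) with
    | none => none                                           -- ok = False; break
    | some t => pvResolve ear_times val rest (if best < t + w then t + w else best)

def pvSweepStep (pre_points : List (Int × List (Int × Int))) (ear_times : List (Int × Int)) (val : PySem.Dict Int Int) (p : Int) : PySem.Dict Int Int :=
  if val.contains p then val                                 -- if p in val: continue
  else
    match pvResolve ear_times val ((PySem.Dict.mk pre_points).getD p []) (-1) with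
    | none => val
    | some best => val.insert p best                         -- val[p] = best

def pvSweep (pre_points : List (Int × List (Int × Int))) (ear_times : List (Int × Int)) (val : PySem.Dict Int Int) : PySem.Dict Int Int :=
  pre_points.foldl (fun val pr => pvSweepStep pre_points ear_times val pr.1) val    -- for p in pre_points

def pvRoundsGo (pre_points : List (Int × List (Int × Int))) (ear_times : List (Int × Int)) : Nat → PySem.Dict Int Int → PySem.Dict Int Int
  | 0, val => val
  | Nat.succ n, val => pvRoundsGo pre_points ear_times n (pvSweep pre_points ear_times val)   -- for _ in range(len(pre_points))

def compute_earliest_time_alt (pre_points : List (Int × List (Int × Int))) (ear_times : List (Int × Int)) (point : Int) : Int :=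
  match (pvRoundsGo pre_points ear_times pre_points.length PySem.Dict.empty).get? point with
  | some v => v
  | none => 0                                                -- val[point] : KeyError

-- ===== PRECONDITION & SPEC =====
-- pvCond: node p has its predecessor list present, every predecessor has an ear_times entry,
-- and every negatively-cached predecessor lies in S.
def pvCond (pre_points : List (Int × List (Int × Int))) (ear_times : List (Int × Int)) (S : List Int) (p : Int) : Bool :=
  match (PySem.Dict.mk pre_points).get? p with
  | none => false
  | some pres => pres.all (fun qw =>
      match (PySem.Dict.mk ear_times).get? qw.1 with
      | none => false
      | some v => if v < 0 then S.contains qw.1 else true)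

-- pvSiter k: the nodes whose ancestry through negatively-cached predecessors is well-founded
-- within depth k, with all the lookups A performs there present.
def pvSiter (pre_points : List (Int × List (Int × Int))) (ear_times : List (Int × Int)) : Nat → List Int
  | 0 => []
  | Nat.succ k => (pre_points.map (·.1)).filter (pvCond pre_points ear_times (pvSiter pre_points ear_times k))

-- Pre_: exactly the inputs on which A returns — point's ancestry through entries with
-- ear_times < 0 is acyclic and every lookup A performs on it is present (otherwise A
-- raises KeyError or recurses forever).
def Pre_compute_earliest_time (pre_points : List (Int × List (Int × Int))) (ear_times : List (Int × Int)) (point : Int) : Prop :=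
  point ∈ pvSiter pre_points ear_times pre_points.length

instance (pre_points : List (Int × List (Int × Int))) (ear_times : List (Int × Int)) (point : Int) : Decidable (Pre_compute_earliest_time pre_points ear_times point) := by unfold Pre_compute_earliest_time; infer_instance

def pvWitness_compute_earliest_time : (List (Int × List (Int × Int))) × (List (Int × Int)) × Int :=
  ([(1, []), (2, [(1, 3)])], [(1, -1), (2, -1)], 2)

def Spec_compute_earliest_time (pre_points : List (Int × List (Int × Int))) (ear_times : List (Int × Int)) (point : Int) (out : Int) : Prop := out = compute_earliest_time_alt pre_points ear_times point
instance (pre_points : List (Int × List (Int × Int))) (ear_times : List (Int × Int)) (point : Int) (out : Int) : Decidable (Spec_compute_earliest_time pre_points ear_times point out) := by unfold Spec_compute_earliest_time; infer_instance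

-- ===== CLAIM (what is proved, stated in full; the proofs are below) =====
def Claim_equal_compute_earliest_time : Prop := ∀ (pre_points : List (Int × List (Int × Int))) (ear_times : List (Int × Int)) (point : Int), Dom_compute_earliest_time pre_points ear_times point → Pre_compute_earliest_time pre_points ear_times point → Spec_compute_earliest_time pre_points ear_times point (compute_earliest_time pre_points ear_times point)

-- ===== LEMMAS AND PROOFS =====

-- pure specification: the earliest time of p computed from the ORIGINAL ear_times, fuel-bounded
mutual
def pvEval (pre_points : List (Int × List (Int × Int))) (ear_times : List (Int × Int)) (k : Nat) (p : Int) : Option Int :=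
  match k with
  | 0 => none
  | Nat.succ k' =>
    match (PySem.Dict.mk pre_points).get? p with
    | none => none
    | some pres => pvEvalL pre_points ear_times k' pres (-1)
termination_by (k, 0)

def pvEvalL (pre_points : List (Int × List (Int × Int))) (ear_times : List (Int × Int)) (k : Nat) (pres : List (Int × Int)) (best : Int) : Option Int :=
  match pres with
  | [] => some best
  | (q, w) :: rest =>
    match (PySem.Dict.mk ear_times).get? q with
    | none => none
    | some v =>
      if v < 0 then
        match pvEval pre_points ear_times k q with
        | none => none
        | some t => pvEvalL pre_points ear_times k rest (if best < t + w then t + w else best)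
      else
        pvEvalL pre_points ear_times k rest (if best < v + w then v + w else best)
termination_by (k, 1 + pres.length)
end

-- ---- basic facts about pvSiter ----
theorem pvCond_mono (PP : List (Int × List (Int × Int))) (ET : List (Int × Int)) (S S' : List Int)
    (hs : ∀ x ∈ S, x ∈ S') (p : Int) (h : pvCond PP ET S p = true) : pvCond PP ET S' p = true := by
  unfold pvCond at h ⊢
  cases hpp : (PySem.Dict.mk PP).get? p with
  | none => rw [hpp] at h; dsimp only at h; exact absurd h (by simp)
  | some pres =>
    rw [hpp] at h
    dsimp only at h ⊢
    rw [List.all_eq_true] at h ⊢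
    intro qw hqw
    have hthis := h qw hqw
    cases het : (PySem.Dict.mk ET).get? qw.1 with
    | none => rw [het] at hthis; dsimp only at hthis; exact absurd hthis (by simp)
    | some v =>
      rw [het] at hthis
      dsimp only at hthis ⊢
      by_cases hv : v < 0
      · simp only [if_pos hv] at hthis ⊢
        simp only [List.contains_eq_mem, decide_eq_true_eq] at hthis ⊢
        exact hs _ hthis
      · simp only [if_neg hv]

theorem pvSiter_subset_succ (PP : List (Int × List (Int × Int))) (ET : List (Int × Int)) :
    ∀ k, ∀ x ∈ pvSiter PP ET k, x ∈ pvSiter PP ET (k + 1) := by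
  intro k
  induction k with
  | zero => intro x hx; simp [pvSiter] at hx
  | succ k ih =>
    intro x hx
    simp only [pvSiter, List.mem_filter] at hx ⊢
    exact ⟨hx.1, pvCond_mono PP ET _ _ ih x hx.2⟩

theorem pvSiter_le (PP : List (Int × List (Int × Int))) (ET : List (Int × Int)) {k m : Nat}
    (hkm : k ≤ m) : ∀ x ∈ pvSiter PP ET k, x ∈ pvSiter PP ET m := by
  induction hkm with
  | refl => exact fun x hx => hx
  | step _ ih => exact fun x hx => pvSiter_subset_succ PP ET _ x (ih x hx)

theorem mem_pvSiter_succ (PP : List (Int × List (Int × Int))) (ET : List (Int × Int)) (k : Nat) (p : Int) :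
    p ∈ pvSiter PP ET (k + 1) ↔ p ∈ PP.map (·.1) ∧ pvCond PP ET (pvSiter PP ET k) p = true := by
  simp [pvSiter, List.mem_filter]

theorem pvCond_elim (PP : List (Int × List (Int × Int))) (ET : List (Int × Int)) (S : List Int) (p : Int)
    (h : pvCond PP ET S p = true) :
    ∃ pres, (PySem.Dict.mk PP).get? p = some pres ∧
      ∀ qw ∈ pres, ∃ v, (PySem.Dict.mk ET).get? qw.1 = some v ∧ (v < 0 → qw.1 ∈ S) := by
  unfold pvCond at h
  cases hpp : (PySem.Dict.mk PP).get? p with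
  | none => rw [hpp] at h; dsimp only at h; exact absurd h (by simp)
  | some pres =>
    rw [hpp] at h
    dsimp only at h
    refine ⟨pres, rfl, ?_⟩
    rw [List.all_eq_true] at h
    intro qw hqw
    have hthis := h qw hqw
    cases het : (PySem.Dict.mk ET).get? qw.1 with
    | none => rw [het] at hthis; dsimp only at hthis; exact absurd hthis (by simp)
    | some v =>
      rw [het] at hthis
      dsimp only at hthis
      refine ⟨v, rfl, ?_⟩
      intro hv
      simp only [if_pos hv, List.contains_eq_mem, decide_eq_true_eq] at hthis
      exact hthis

-- ---- unfolding equations for the fuel recursions, phrased on a known lookup ----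
theorem pvEvalL_cons_some (PP : List (Int × List (Int × Int))) (ET : List (Int × Int)) (k : Nat)
    (q w best : Int) (rest : List (Int × Int)) {v : Int}
    (h : (PySem.Dict.mk ET).get? q = some v) :
    pvEvalL PP ET k ((q, w) :: rest) best =
      if v < 0 then
        (match pvEval PP ET k q with
         | none => none
         | some t => pvEvalL PP ET k rest (if best < t + w then t + w else best))
      else pvEvalL PP ET k rest (if best < v + w then v + w else best) := by
  rw [pvEvalL, h]

theorem pvEval_succ_some (PP : List (Int × List (Int × Int))) (ET : List (Int × Int)) (k : Nat)
    (p : Int) {pres : List (Int × Int)} (h : (PySem.Dict.mk PP).get? p = some pres) :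
    pvEval PP ET (k + 1) p = pvEvalL PP ET k pres (-1) := by
  rw [pvEval, h]

theorem pvLoopA_cons_some (PP : List (Int × List (Int × Int))) (f : Nat) (q w earliest : Int)
    (rest : List (Int × Int)) (ear : PySem.Dict Int Int) {v : Int} (h : ear.get? q = some v) :
    pvLoopA PP f ((q, w) :: rest) ear earliest =
      if v < 0 then
        (match pvGoA PP f ear q with
         | none => none
         | some (r, ear1) =>
           match (ear1.insert q r).get? q with
           | none => none
           | some t => pvLoopA PP f rest (ear1.insert q r) (if earliest < t + w then t + w else earliest))
      else pvLoopA PP f rest ear (if earliest < v + w then v + w else earliest) := by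
  rw [pvLoopA, h]

theorem pvGoA_succ_some (PP : List (Int × List (Int × Int))) (f : Nat) (p : Int)
    (ear : PySem.Dict Int Int) {pres : List (Int × Int)}
    (h : (PySem.Dict.mk PP).get? p = some pres) :
    pvGoA PP (f + 1) ear p = pvLoopA PP f pres ear (-1) := by
  rw [pvGoA, h]

theorem pvResolve_cons_some_neg (ET : List (Int × Int)) (q w best : Int) (rest : List (Int × Int))
    (val : PySem.Dict Int Int) {v : Int} (h : (PySem.Dict.mk ET).get? q = some v) (hv : v < 0) :
    pvResolve ET val ((q, w) :: rest) best =
      match val.get? q with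
      | none => none
      | some t => pvResolve ET val rest (if best < t + w then t + w else best) := by
  rw [pvResolve, h]
  simp only [if_pos hv]

theorem pvResolve_cons_some_nonneg (ET : List (Int × Int)) (q w best : Int) (rest : List (Int × Int))
    (val : PySem.Dict Int Int) {v : Int} (h : (PySem.Dict.mk ET).get? q = some v) (hv : ¬ v < 0) :
    pvResolve ET val ((q, w) :: rest) best =
      pvResolve ET val rest (if best < v + w then v + w else best) := by
  rw [pvResolve, h]
  simp only [if_neg hv]

-- ---- fuel monotonicity and uniqueness of pvEval ----
theorem pvEvalL_mono (PP : List (Int × List (Int × Int))) (ET : List (Int × Int)) (k : Nat)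
    (h : ∀ p v, pvEval PP ET k p = some v → pvEval PP ET (k + 1) p = some v) :
    ∀ pres best v, pvEvalL PP ET k pres best = some v → pvEvalL PP ET (k + 1) pres best = some v := by
  intro pres
  induction pres with
  | nil => intro best v hv; simpa [pvEvalL] using hv
  | cons qw rest ih =>
    intro best v hv
    obtain ⟨q, w⟩ := qw
    cases het : (PySem.Dict.mk ET).get? q with
    | none => rw [pvEvalL, het] at hv; dsimp only at hv; exact absurd hv (by simp)
    | some v0 =>
      rw [pvEvalL_cons_some PP ET k q w best rest het] at hv
      rw [pvEvalL_cons_some PP ET (k + 1) q w best rest het]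
      by_cases hv0 : v0 < 0
      · simp only [if_pos hv0] at hv ⊢
        cases he : pvEval PP ET k q with
        | none => rw [he] at hv; dsimp only at hv; exact absurd hv (by simp)
        | some t =>
          rw [he] at hv
          dsimp only at hv
          rw [h q t he]
          dsimp only
          exact ih _ _ hv
      · simp only [if_neg hv0] at hv ⊢
        exact ih _ _ hv

theorem pvEval_mono (PP : List (Int × List (Int × Int))) (ET : List (Int × Int)) :
    ∀ k p v, pvEval PP ET k p = some v → pvEval PP ET (k + 1) p = some v := by
  intro k
  induction k with
  | zero => intro p v hv; simp [pvEval] at hv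
  | succ k ih =>
    intro p v hv
    cases hpp : (PySem.Dict.mk PP).get? p with
    | none => rw [pvEval, hpp] at hv; dsimp only at hv; exact absurd hv (by simp)
    | some pres =>
      rw [pvEval_succ_some PP ET k p hpp] at hv
      rw [pvEval_succ_some PP ET (k + 1) p hpp]
      exact pvEvalL_mono PP ET k ih pres _ v hv

theorem pvEval_fuel_le (PP : List (Int × List (Int × Int))) (ET : List (Int × Int)) {k m : Nat}
    (hkm : k ≤ m) {p : Int} {v : Int} (hv : pvEval PP ET k p = some v) : pvEval PP ET m p = some v := by
  induction hkm with
  | refl => exact hv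
  | step _ ih => exact pvEval_mono PP ET _ p v ih

theorem pvEval_unique (PP : List (Int × List (Int × Int))) (ET : List (Int × Int)) {j k : Nat}
    {p a b : Int} (ha : pvEval PP ET j p = some a) (hb : pvEval PP ET k p = some b) : a = b := by
  have h1 := pvEval_fuel_le PP ET (Nat.le_max_left j k) ha
  have h2 := pvEval_fuel_le PP ET (Nat.le_max_right j k) hb
  rw [h1] at h2
  exact Option.some_inj.mp h2

-- ---- pvEval succeeds on pvSiter ----
theorem pvEvalL_succeeds (PP : List (Int × List (Int × Int))) (ET : List (Int × Int)) (k : Nat)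
    (h : ∀ q, q ∈ pvSiter PP ET k → ∃ v, pvEval PP ET k q = some v) :
    ∀ pres, (∀ qw ∈ pres, ∃ v, (PySem.Dict.mk ET).get? qw.1 = some v ∧ (v < 0 → qw.1 ∈ pvSiter PP ET k)) →
    ∀ best, ∃ v, pvEvalL PP ET k pres best = some v := by
  intro pres
  induction pres with
  | nil => intro _ best; exact ⟨best, by rw [pvEvalL]⟩
  | cons qw rest ih =>
    intro hall best
    obtain ⟨q, w⟩ := qw
    obtain ⟨v0, hv0, hneg⟩ := hall (q, w) (List.mem_cons_self ..)
    rw [pvEvalL_cons_some PP ET k q w best rest hv0]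
    by_cases hlt : v0 < 0
    · simp only [if_pos hlt]
      obtain ⟨t, ht⟩ := h q (hneg hlt)
      rw [ht]
      dsimp only
      exact ih (fun qw hqw => hall qw (List.mem_cons_of_mem _ hqw)) _
    · simp only [if_neg hlt]
      exact ih (fun qw hqw => hall qw (List.mem_cons_of_mem _ hqw)) _

theorem pvEval_succeeds (PP : List (Int × List (Int × Int))) (ET : List (Int × Int)) :
    ∀ k p, p ∈ pvSiter PP ET k → ∃ v, pvEval PP ET k p = some v := by
  intro k
  induction k with
  | zero => intro p hp; simp [pvSiter] at hp
  | succ k ih =>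
    intro p hp
    obtain ⟨-, hc⟩ := (mem_pvSiter_succ PP ET k p).mp hp
    obtain ⟨pres, hpp, hall⟩ := pvCond_elim PP ET _ p hc
    rw [pvEval_succ_some PP ET k p hpp]
    exact pvEvalL_succeeds PP ET k ih pres hall (-1)

-- ---- A-side invariant: the cache holds original values, or pvEval values over originally
-- negative entries ----
def pvInv (PP : List (Int × List (Int × Int))) (ET : List (Int × Int)) (ear : PySem.Dict Int Int) : Prop :=
  ∀ q, (PySem.Dict.mk ET).get? q = ear.get? q ∨
    (∃ v v', (PySem.Dict.mk ET).get? q = some v ∧ ear.get? q = some v' ∧ v < 0 ∧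
      ∃ k, pvEval PP ET k q = some v')

theorem pvInv_init (PP : List (Int × List (Int × Int))) (ET : List (Int × Int)) :
    pvInv PP ET (PySem.Dict.mk ET) := fun _ => Or.inl rfl

theorem pvInv_insert (PP : List (Int × List (Int × Int))) (ET : List (Int × Int))
    {ear : PySem.Dict Int Int} (h : pvInv PP ET ear) {q v r : Int} {k : Nat}
    (hq : (PySem.Dict.mk ET).get? q = some v) (hv : v < 0) (hr : pvEval PP ET k q = some r) :
    pvInv PP ET (ear.insert q r) := by
  intro q'
  rw [PySem.Dict.get?_insert]
  by_cases hq' : q' = q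
  · subst hq'
    rw [if_pos rfl]
    exact Or.inr ⟨v, r, hq, rfl, hv, k, hr⟩
  · simp only [if_neg hq']
    exact h q'

theorem pvInv_lookup (PP : List (Int × List (Int × Int))) (ET : List (Int × Int))
    {ear : PySem.Dict Int Int} (h : pvInv PP ET ear) {q v0 : Int}
    (hq : (PySem.Dict.mk ET).get? q = some v0) :
    ∃ v', ear.get? q = some v' ∧ (v' = v0 ∨ (v0 < 0 ∧ ∃ k, pvEval PP ET k q = some v')) := by
  rcases h q with heq | ⟨v, v', hv, hv', hneg, hk⟩
  · exact ⟨v0, by rw [← heq, hq], Or.inl rfl⟩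
  · rw [hq] at hv
    obtain rfl : v0 = v := Option.some_inj.mp hv
    exact ⟨v', hv', Or.inr ⟨hneg, hk⟩⟩

-- ---- A computes pvEval ----
theorem pvLoopA_correct (PP : List (Int × List (Int × Int))) (ET : List (Int × Int)) (k : Nat)
    (IH : ∀ f, k ≤ f → ∀ p, p ∈ pvSiter PP ET k → ∀ ear, pvInv PP ET ear →
      ∃ v ear', pvGoA PP f ear p = some (v, ear') ∧ pvEval PP ET k p = some v ∧ pvInv PP ET ear') :
    ∀ pres, (∀ qw ∈ pres, ∃ v, (PySem.Dict.mk ET).get? qw.1 = some v ∧ (v < 0 → qw.1 ∈ pvSiter PP ET k)) →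
    ∀ f, k ≤ f → ∀ best ear, pvInv PP ET ear →
    ∃ v ear', pvLoopA PP f pres ear best = some (v, ear') ∧ pvEvalL PP ET k pres best = some v ∧
      pvInv PP ET ear' := by
  intro pres
  induction pres with
  | nil => intro _ f hf best ear hinv; exact ⟨best, ear, by rw [pvLoopA], by rw [pvEvalL], hinv⟩
  | cons qw rest ihr =>
    intro hall f hf best ear hinv
    obtain ⟨q, w⟩ := qw
    obtain ⟨v0, hv0, hneg⟩ := hall (q, w) (List.mem_cons_self ..)
    have hallr : ∀ qw ∈ rest, ∃ v, (PySem.Dict.mk ET).get? qw.1 = some v ∧ (v < 0 → qw.1 ∈ pvSiter PP ET k) :=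
      fun qw hqw => hall qw (List.mem_cons_of_mem _ hqw)
    obtain ⟨v', hear, hcase⟩ := pvInv_lookup PP ET hinv hv0
    rw [pvLoopA_cons_some PP f q w best rest ear hear]
    rw [pvEvalL_cons_some PP ET k q w best rest hv0]
    by_cases hv' : v' < 0
    · -- current cache negative: A recurses; the original entry must be negative too
      have hv0neg : v0 < 0 := by
        rcases hcase with rfl | ⟨h, -⟩
        · exact hv'
        · exact h
      obtain ⟨r, ear1, hgo, heval, hinv1⟩ := IH f hf q (hneg hv0neg) ear hinv
      simp only [if_pos hv', if_pos hv0neg, hgo, heval]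
      rw [PySem.Dict.get?_insert_self]
      dsimp only
      have hinv2 : pvInv PP ET (ear1.insert q r) := pvInv_insert PP ET hinv1 hv0 hv0neg heval
      exact ihr hallr f hf (if best < r + w then r + w else best) _ hinv2
    · -- current cache non-negative: A uses the cached value
      simp only [if_neg hv']
      by_cases hv0n : v0 < 0
      · -- originally negative, so the cache holds a computed pvEval value
        simp only [if_pos hv0n]
        obtain ⟨t0, ht0⟩ := pvEval_succeeds PP ET k q (hneg hv0n)
        rcases hcase with rfl | ⟨-, j, hj⟩
        · exact absurd hv0n hv'
        · have hte : t0 = v' := pvEval_unique PP ET ht0 hj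
          rw [ht0, hte]
          dsimp only
          exact ihr hallr f hf (if best < v' + w then v' + w else best) ear hinv
      · -- originally non-negative: the cache was never touched, v' = v0
        have hvv : v' = v0 := by
          rcases hcase with h | ⟨h, -⟩
          · exact h
          · exact absurd h hv0n
        subst hvv
        simp only [if_neg hv0n]
        exact ihr hallr f hf (if best < v' + w then v' + w else best) ear hinv

theorem pvGoA_correct (PP : List (Int × List (Int × Int))) (ET : List (Int × Int)) :
    ∀ k f, k ≤ f → ∀ p, p ∈ pvSiter PP ET k → ∀ ear, pvInv PP ET ear →
    ∃ v ear', pvGoA PP f ear p = some (v, ear') ∧ pvEval PP ET k p = some v ∧ pvInv PP ET ear' := by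
  intro k
  induction k with
  | zero => intro f hf p hp; simp [pvSiter] at hp
  | succ k ih =>
    intro f hf p hp ear hinv
    obtain ⟨f', rfl⟩ : ∃ f', f = f' + 1 := ⟨f - 1, by omega⟩
    obtain ⟨-, hc⟩ := (mem_pvSiter_succ PP ET k p).mp hp
    obtain ⟨pres, hpp, hall⟩ := pvCond_elim PP ET _ p hc
    rw [pvGoA_succ_some PP f' p ear hpp]
    rw [pvEval_succ_some PP ET k p hpp]
    exact pvLoopA_correct PP ET k ih pres hall f' (by omega) (-1) ear hinv

-- ---- B-side invariants ----
def pvInvV (PP : List (Int × List (Int × Int))) (ET : List (Int × Int)) (val : PySem.Dict Int Int) : Prop :=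
  ∀ q v', q ∈ pvSiter PP ET PP.length → val.get? q = some v' → ∃ k, pvEval PP ET k q = some v'

def pvSubD (d d' : PySem.Dict Int Int) : Prop := ∀ q v, d.get? q = some v → d'.get? q = some v

def pvCov (PP : List (Int × List (Int × Int))) (ET : List (Int × Int)) (r : Nat) (val : PySem.Dict Int Int) : Prop :=
  ∀ q ∈ pvSiter PP ET r, (val.get? q).isSome

theorem pvSubD_cov (PP : List (Int × List (Int × Int))) (ET : List (Int × Int)) {r : Nat}
    {d d' : PySem.Dict Int Int} (hs : pvSubD d d') (hc : pvCov PP ET r d) : pvCov PP ET r d' := by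
  intro q hq
  obtain ⟨v, hv⟩ := Option.isSome_iff_exists.mp (hc q hq)
  rw [hs q v hv]
  rfl

theorem pvResolve_eval (PP : List (Int × List (Int × Int))) (ET : List (Int × Int)) (m : Nat)
    (hm : m ≤ PP.length) {val : PySem.Dict Int Int} (hinv : pvInvV PP ET val) :
    ∀ pres, (∀ qw ∈ pres, ∃ v0, (PySem.Dict.mk ET).get? qw.1 = some v0 ∧ (v0 < 0 → qw.1 ∈ pvSiter PP ET m)) →
    ∀ best v, pvResolve ET val pres best = some v → pvEvalL PP ET m pres best = some v := by
  intro pres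
  induction pres with
  | nil => intro _ best v hv; simpa [pvResolve, pvEvalL] using hv
  | cons qw rest ih =>
    intro hall best v hv
    obtain ⟨q, w⟩ := qw
    obtain ⟨v0, hv0, hneg⟩ := hall (q, w) (List.mem_cons_self ..)
    have hallr : ∀ qw ∈ rest, ∃ v1, (PySem.Dict.mk ET).get? qw.1 = some v1 ∧ (v1 < 0 → qw.1 ∈ pvSiter PP ET m) :=
      fun qw hqw => hall qw (List.mem_cons_of_mem _ hqw)
    rw [pvEvalL_cons_some PP ET m q w best rest hv0]
    by_cases hlt : v0 < 0
    · rw [pvResolve_cons_some_neg ET q w best rest val hv0 hlt] at hv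
      simp only [if_pos hlt]
      cases hval : val.get? q with
      | none => rw [hval] at hv; dsimp only at hv; exact absurd hv (by simp)
      | some t =>
        rw [hval] at hv
        dsimp only at hv
        have hqm : q ∈ pvSiter PP ET m := hneg hlt
        obtain ⟨j, hj⟩ := hinv q t (pvSiter_le PP ET hm q hqm) hval
        obtain ⟨t0, ht0⟩ := pvEval_succeeds PP ET m q hqm
        have hteq : t0 = t := pvEval_unique PP ET ht0 hj
        rw [ht0, hteq]
        dsimp only
        exact ih hallr _ v hv
    · rw [pvResolve_cons_some_nonneg ET q w best rest val hv0 hlt] at hv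
      simp only [if_neg hlt]
      exact ih hallr _ v hv

theorem pvResolve_succeeds (ET : List (Int × Int)) (PP : List (Int × List (Int × Int))) (m : Nat)
    {val : PySem.Dict Int Int} (hcov : pvCov PP ET m val) :
    ∀ pres, (∀ qw ∈ pres, ∃ v0, (PySem.Dict.mk ET).get? qw.1 = some v0 ∧ (v0 < 0 → qw.1 ∈ pvSiter PP ET m)) →
    ∀ best, ∃ v, pvResolve ET val pres best = some v := by
  intro pres
  induction pres with
  | nil => intro _ best; exact ⟨best, rfl⟩
  | cons qw rest ih =>
    intro hall best
    obtain ⟨q, w⟩ := qw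
    obtain ⟨v0, hv0, hneg⟩ := hall (q, w) (List.mem_cons_self ..)
    have hallr : ∀ qw ∈ rest, ∃ v1, (PySem.Dict.mk ET).get? qw.1 = some v1 ∧ (v1 < 0 → qw.1 ∈ pvSiter PP ET m) :=
      fun qw hqw => hall qw (List.mem_cons_of_mem _ hqw)
    by_cases hlt : v0 < 0
    · rw [pvResolve_cons_some_neg ET q w best rest val hv0 hlt]
      obtain ⟨t, ht⟩ := Option.isSome_iff_exists.mp (hcov q (hneg hlt))
      rw [ht]
      dsimp only
      exact ih hallr _
    · rw [pvResolve_cons_some_nonneg ET q w best rest val hv0 hlt]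
      exact ih hallr _

theorem pvSweepStep_sub (PP : List (Int × List (Int × Int))) (ET : List (Int × Int))
    (val : PySem.Dict Int Int) (p : Int) : pvSubD val (pvSweepStep PP ET val p) := by
  intro q v hv
  unfold pvSweepStep
  by_cases hc : val.contains p
  · simp only [if_pos hc]; exact hv
  · simp only [if_neg hc]
    cases hres : pvResolve ET val ((PySem.Dict.mk PP).getD p []) (-1) with
    | none => exact hv
    | some best =>
      rw [PySem.Dict.get?_insert]
      by_cases hqp : q = p
      · subst hqp
        rw [PySem.Dict.contains_eq_isSome_get?, hv] at hc
        exact absurd rfl hc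
      · simp only [if_neg hqp]; exact hv

theorem pvSweepStep_inv (PP : List (Int × List (Int × Int))) (ET : List (Int × Int))
    {val : PySem.Dict Int Int} (hinv : pvInvV PP ET val) (p : Int) :
    pvInvV PP ET (pvSweepStep PP ET val p) := by
  unfold pvSweepStep
  by_cases hc : val.contains p
  · simp only [if_pos hc]; exact hinv
  · simp only [if_neg hc]
    cases hres : pvResolve ET val ((PySem.Dict.mk PP).getD p []) (-1) with
    | none => exact hinv
    | some best =>
      intro q v' hq hv'
      rw [PySem.Dict.get?_insert] at hv'
      by_cases hqp : q = p
      · subst hqp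
        rw [if_pos rfl] at hv'
        obtain rfl : best = v' := Option.some_inj.mp hv'
        obtain ⟨N', hN⟩ : ∃ N', PP.length = N' + 1 := by
          cases h : PP.length with
          | zero => rw [h] at hq; simp [pvSiter] at hq
          | succ n => exact ⟨n, rfl⟩
        rw [hN] at hq
        obtain ⟨-, hcnd⟩ := (mem_pvSiter_succ PP ET N' q).mp hq
        obtain ⟨pres, hpp, hall⟩ := pvCond_elim PP ET _ q hcnd
        have hgetD : (PySem.Dict.mk PP).getD q [] = pres := by
          rw [PySem.Dict.getD_eq_get?_getD, hpp]; rfl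
        rw [hgetD] at hres
        refine ⟨N' + 1, ?_⟩
        rw [pvEval_succ_some PP ET N' q hpp]
        exact pvResolve_eval PP ET N' (by omega) hinv pres hall (-1) best hres
      · simp only [if_neg hqp] at hv'
        exact hinv q v' hq hv'

theorem pvSweepStep_covers (PP : List (Int × List (Int × Int))) (ET : List (Int × Int))
    {r : Nat} {val : PySem.Dict Int Int} (hcov : pvCov PP ET r val) {p : Int}
    (hp : p ∈ pvSiter PP ET (r + 1)) : ((pvSweepStep PP ET val p).get? p).isSome := by
  unfold pvSweepStep
  by_cases hc : val.contains p
  · simp only [if_pos hc]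
    rw [← PySem.Dict.contains_eq_isSome_get?]
    exact hc
  · simp only [if_neg hc]
    obtain ⟨-, hcnd⟩ := (mem_pvSiter_succ PP ET r p).mp hp
    obtain ⟨pres, hpp, hall⟩ := pvCond_elim PP ET _ p hcnd
    have hgetD : (PySem.Dict.mk PP).getD p [] = pres := by
      rw [PySem.Dict.getD_eq_get?_getD, hpp]; rfl
    rw [hgetD]
    obtain ⟨best, hbest⟩ := pvResolve_succeeds ET PP r hcov pres hall (-1)
    rw [hbest, PySem.Dict.get?_insert_self]
    rfl

theorem pvSweep_fold (PP : List (Int × List (Int × Int))) (ET : List (Int × Int)) (r : Nat) :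
    ∀ (l : List (Int × List (Int × Int))) (val : PySem.Dict Int Int),
      pvInvV PP ET val → pvCov PP ET r val →
      pvInvV PP ET (l.foldl (fun val pr => pvSweepStep PP ET val pr.1) val) ∧
      pvSubD val (l.foldl (fun val pr => pvSweepStep PP ET val pr.1) val) ∧
      (∀ pr ∈ l, pr.1 ∈ pvSiter PP ET (r + 1) →
        ((l.foldl (fun val pr => pvSweepStep PP ET val pr.1) val).get? pr.1).isSome) := by
  intro l
  induction l with
  | nil => intro val hinv hcov; exact ⟨hinv, fun _ _ h => h, by simp⟩
  | cons pr rest ih =>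
    intro val hinv hcov
    simp only [List.foldl_cons]
    have hsub1 : pvSubD val (pvSweepStep PP ET val pr.1) := pvSweepStep_sub PP ET val pr.1
    have hinv1 : pvInvV PP ET (pvSweepStep PP ET val pr.1) := pvSweepStep_inv PP ET hinv pr.1
    have hcov1 : pvCov PP ET r (pvSweepStep PP ET val pr.1) := pvSubD_cov PP ET hsub1 hcov
    obtain ⟨hinv2, hsub2, hmem2⟩ := ih (pvSweepStep PP ET val pr.1) hinv1 hcov1
    refine ⟨hinv2, fun q v hv => hsub2 q v (hsub1 q v hv), ?_⟩
    intro pr' hpr' hp'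
    rcases List.mem_cons.mp hpr' with rfl | hpr'
    · obtain ⟨v, hv⟩ := Option.isSome_iff_exists.mp (pvSweepStep_covers PP ET hcov hp')
      rw [hsub2 _ v hv]
      rfl
    · exact hmem2 pr' hpr' hp'

theorem pvSweep_correct (PP : List (Int × List (Int × Int))) (ET : List (Int × Int)) (r : Nat)
    {val : PySem.Dict Int Int} (hinv : pvInvV PP ET val) (hcov : pvCov PP ET r val) :
    pvInvV PP ET (pvSweep PP ET val) ∧ pvCov PP ET (r + 1) (pvSweep PP ET val) := by
  obtain ⟨hinv', hsub', hmem'⟩ := pvSweep_fold PP ET r PP val hinv hcov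
  refine ⟨hinv', ?_⟩
  intro q hq
  have hqk : q ∈ PP.map (·.1) := ((mem_pvSiter_succ PP ET r q).mp hq).1
  obtain ⟨pr, hpr, hq1⟩ := List.mem_map.mp hqk
  have hfin := hmem' pr hpr (by rw [hq1]; exact hq)
  rw [hq1] at hfin
  exact hfin

theorem pvRoundsGo_correct (PP : List (Int × List (Int × Int))) (ET : List (Int × Int)) :
    ∀ (n : Nat) (r : Nat) (val : PySem.Dict Int Int), pvInvV PP ET val → pvCov PP ET r val →
      pvInvV PP ET (pvRoundsGo PP ET n val) ∧ pvCov PP ET (r + n) (pvRoundsGo PP ET n val) := by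
  intro n
  induction n with
  | zero => intro r val hinv hcov; exact ⟨hinv, hcov⟩
  | succ n ih =>
    intro r val hinv hcov
    rw [pvRoundsGo]
    obtain ⟨hinv1, hcov1⟩ := pvSweep_correct PP ET r hinv hcov
    obtain ⟨hinv2, hcov2⟩ := ih (r + 1) (pvSweep PP ET val) hinv1 hcov1
    refine ⟨hinv2, ?_⟩
    have harith : r + 1 + n = r + (n + 1) := by omega
    rw [← harith]
    exact hcov2

-- ===== VERDICT (by name: the statement is the Claim_ definition above) =====
theorem compute_earliest_time_spec : Claim_equal_compute_earliest_time := by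
  intro PP ET point _ hpre
  unfold Pre_compute_earliest_time at hpre
  unfold Spec_compute_earliest_time
  -- A side
  obtain ⟨vA, ear', hgo, hevA, -⟩ :=
    pvGoA_correct PP ET PP.length (PP.length + 1) (by omega) point hpre
      (PySem.Dict.mk ET) (pvInv_init PP ET)
  -- B side
  have hinv0 : pvInvV PP ET PySem.Dict.empty := by
    intro q v' _ hq
    rw [PySem.Dict.get?_empty] at hq
    exact absurd hq (by simp)
  have hcov0 : pvCov PP ET 0 PySem.Dict.empty := by
    intro q hq; simp [pvSiter] at hq
  obtain ⟨hinvN, hcovN⟩ := pvRoundsGo_correct PP ET PP.length 0 PySem.Dict.empty hinv0 hcov0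
  rw [Nat.zero_add] at hcovN
  obtain ⟨vB, hvB⟩ := Option.isSome_iff_exists.mp (hcovN point hpre)
  obtain ⟨j, hj⟩ := hinvN point vB hpre hvB
  have : vB = vA := pvEval_unique PP ET hj hevA
  unfold compute_earliest_time compute_earliest_time_alt
  rw [hgo, hvB, this]
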